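-- pv_equiv track=rewrite | github.com/oxytocin/Doc-Comments-Conversion | docx_to_text.py | count_preceeding_backslashes
-- ===== SOURCE A (Python) =====
-- def count_preceeding_backslashes(text: str, idx: int) -> int:
--     """Count backslashes immediately preceeding char at idx"""
--     backslashes_encountered = 0
--     i = 0
--     while True:
--         i += 1
--         if idx - i < 0:
--             return backslashes_encountered
--         try:
--             char = text[idx-i]
--         except IndexError:
--             return backslashes_encountered
--         if char != "\\":
--             return backslashes_encountered
--         backslashes_encountered += 1
-- ===== SOURCE B (Python) =====
-- def count_preceeding_backslashes(text: str, idx: int) -> int: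
--     """Count backslashes immediately preceeding char at idx"""
--     if idx < 0 or idx > len(text):
--         return 0
--     s = text[:idx]
--     return len(s) - len(s.rstrip("\\"))
-- ===== Notes on version B (the rewrite author's own statement) =====
-- stated objective: simpler
-- what changed: Replaced A's backward per-character while-loop with a running counter by taking the prefix text[:idx] (after a plain bounds check) and returning the length difference against its rstrip('\\'), so no explicit scanning loop or counter remains.
import Mathlib
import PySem

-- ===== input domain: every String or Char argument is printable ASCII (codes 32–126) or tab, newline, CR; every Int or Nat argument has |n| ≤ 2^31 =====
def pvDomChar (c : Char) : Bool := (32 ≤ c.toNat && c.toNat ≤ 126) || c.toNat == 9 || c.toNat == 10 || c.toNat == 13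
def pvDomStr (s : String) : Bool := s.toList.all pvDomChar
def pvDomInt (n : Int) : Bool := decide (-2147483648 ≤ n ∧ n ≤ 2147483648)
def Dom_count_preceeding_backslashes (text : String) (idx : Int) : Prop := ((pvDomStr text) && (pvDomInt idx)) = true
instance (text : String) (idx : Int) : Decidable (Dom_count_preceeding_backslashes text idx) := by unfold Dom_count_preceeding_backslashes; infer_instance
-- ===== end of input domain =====

-- B replaces A's backward character-by-character loop by `len(s) - len(s.rstrip('\\'))` on the prefix s = text[:idx]; objective: simpler.

-- ===== PORT A =====
-- the `while True` loop of A: state = (i, backslashes_encountered); terminates because idx - i strictly decreases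
def pvALoop (cs : List Char) (idx : Int) (i : Nat) (acc : Int) : Int :=
  if _h : idx - i < 0 then acc
  else
    match PySem.List.pyGet? cs (idx - i) with
    | none => acc                        -- except IndexError: return
    | some c =>
      if c ≠ '\\' then acc
      else pvALoop cs idx (i + 1) (acc + 1)
termination_by (idx - i + 1).toNat
decreasing_by omega

def count_preceeding_backslashes (text : String) (idx : Int) : Int :=
  pvALoop text.toList idx 1 0

-- ===== PORT B =====
def count_preceeding_backslashes_alt (text : String) (idx : Int) : Int :=
  if idx < 0 ∨ PySem.Str.len text < idx then 0
  else
    let s := PySem.List.slice text.toList none (some idx)      -- text[:idx]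
    -- s.rstrip("\\"): hand port, exact — removes exactly the trailing '\\' characters
    let stripped := (s.reverse.dropWhile (fun c => c == '\\')).reverse
    (s.length : Int) - (stripped.length : Int)

-- ===== PRECONDITION & SPEC =====
def Spec_count_preceeding_backslashes (text : String) (idx : Int) (out : Int) : Prop := out = count_preceeding_backslashes_alt text idx
instance (text : String) (idx : Int) (out : Int) : Decidable (Spec_count_preceeding_backslashes text idx out) := by unfold Spec_count_preceeding_backslashes; infer_instance

-- ===== CLAIM (what is proved, stated in full; the proofs are below) =====
def Claim_equal_count_preceeding_backslashes : Prop := ∀ (text : String) (idx : Int), Dom_count_preceeding_backslashes text idx → Spec_count_preceeding_backslashes text idx (count_preceeding_backslashes text idx)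

-- ===== LEMMAS AND PROOFS =====

-- proof-side characterisation of A's backward scan: run length of '\\' at positions p, p-1, …
def pvTrail (cs : List Char) (p : Int) : Int :=
  if _h : p < 0 then 0
  else
    match PySem.List.pyGet? cs p with
    | none => 0
    | some c => if c = '\\' then 1 + pvTrail cs (p - 1) else 0
termination_by (p + 1).toNat
decreasing_by omega

theorem pvALoop_eq_trail (cs : List Char) (idx : Int) (i : Nat) (acc : Int) :
    pvALoop cs idx i acc = acc + pvTrail cs (idx - i) := by
  fun_induction pvALoop cs idx i acc with
  | case1 i acc h =>
      rw [pvTrail, dif_pos h]; ring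
  | case2 i acc h hg =>
      rw [pvTrail, dif_neg h]
      simp only [hg]; ring
  | case3 i acc h c hg hc =>
      rw [pvTrail, dif_neg h]
      simp only [hg]
      rw [if_neg (by simpa using hc)]; ring
  | case4 i acc h c hg hc ih =>
      rw [pvTrail, dif_neg h]
      simp only [hg]
      rw [if_pos (by simpa using hc)]
      rw [ih]
      have : idx - (i + 1 : Nat) = idx - i - 1 := by push_cast; ring
      rw [this]; ring

theorem pvTrail_eq_takeWhile (cs : List Char) (n : Nat) (h : n ≤ cs.length) :
    pvTrail cs ((n : Int) - 1)
      = (((cs.take n).reverse.takeWhile (fun c => c == '\\')).length : Int) := by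
  induction n with
  | zero => rw [pvTrail]; simp
  | succ m ih =>
      have hm : m < cs.length := by omega
      have h1 : ((m + 1 : Nat) : Int) - 1 = (m : Int) := by push_cast; ring
      rw [h1, pvTrail, dif_neg (by omega : ¬ ((m : Int) < 0))]
      have hget : PySem.List.pyGet? cs (m : Int) = some cs[m] := by
        simp [PySem.List.pyGet?_natCast, List.getElem?_eq_getElem hm]
      simp only [hget]
      have htake : cs.take (m + 1) = cs.take m ++ [cs[m]] := by
        rw [List.take_add_one, List.getElem?_eq_getElem hm]
        simp only [Option.toList]
      rw [htake]
      simp only [List.reverse_append, List.reverse_singleton, List.singleton_append,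
        List.takeWhile_cons]
      by_cases hc : cs[m] = '\\'
      · rw [if_pos hc, ih (by omega)]
        simp [hc]
        omega
      · rw [if_neg hc]
        simp [hc]

theorem count_preceeding_backslashes_spec_aux (text : String) (idx : Int) :
    count_preceeding_backslashes text idx = count_preceeding_backslashes_alt text idx := by
  unfold count_preceeding_backslashes count_preceeding_backslashes_alt
  set cs := text.toList with hcs
  have hlen : PySem.Str.len text = (cs.length : Int) := by
    simp [PySem.Str.len_eq, hcs]
  rw [pvALoop_eq_trail]
  have hcast : idx - ((1 : Nat) : Int) = idx - 1 := by norm_num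
  rw [hcast]
  by_cases hneg : idx < 0
  · rw [pvTrail, dif_pos (by omega : idx - 1 < 0)]
    rw [if_pos (Or.inl hneg)]
    ring
  · by_cases hbig : (cs.length : Int) < idx
    · -- idx past the end: A's first access raises IndexError (→ return 0), B's bounds guard returns 0
      rw [pvTrail, dif_neg (by omega : ¬ idx - 1 < 0)]
      have hnone : PySem.List.pyGet? cs (idx - 1) = none := by
        rw [PySem.List.pyGet?_eq_none_iff]
        unfold PySem.Raise.InRange
        omega
      simp only [hnone]
      rw [if_pos (Or.inr (by omega))]
      ring
    · -- 0 ≤ idx ≤ len(text): the main case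
      rw [if_neg (by rw [hlen]; omega)]
      obtain ⟨n, rfl⟩ : ∃ n : Nat, idx = (n : Int) :=
        ⟨idx.toNat, (Int.toNat_of_nonneg (by omega)).symm⟩
      have hn : n ≤ cs.length := by omega
      have hslice : PySem.List.slice cs none (some (n : Int)) = cs.take n := by
        simp [PySem.List.slice_to_natCast]
      simp only [hslice]
      rw [pvTrail_eq_takeWhile cs n hn]
      have hsplit : ((cs.take n).reverse.takeWhile (fun c => c == '\\')).length
          + ((cs.take n).reverse.dropWhile (fun c => c == '\\')).length
          = (cs.take n).reverse.length := by
        have h2 := congrArg List.length (List.takeWhile_append_dropWhile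
          (p := fun c => c == '\\') (l := (cs.take n).reverse))
        rw [List.length_append] at h2
        exact h2
      simp only [List.length_reverse] at hsplit ⊢
      omega

-- ===== VERDICT (by name: the statement is the Claim_ definition above) =====
theorem count_preceeding_backslashes_spec : Claim_equal_count_preceeding_backslashes := by
  intro text idx _
  unfold Spec_count_preceeding_backslashes
  exact count_preceeding_backslashes_spec_aux text idx
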